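-- pv_equiv track=rewrite | github.com/mitchins/perception-toolkit | perception_api/classifier.py | _map_top_level_key
-- ===== SOURCE A (Python) =====
-- def _map_top_level_key(key: str) -> str | None:
--     top_level_mappings = (
--         ("_conv_stem.", "conv_stem."),
--         ("_bn0.", "bn1."),
--         ("_conv_head.", "conv_head."),
--         ("_bn1.", "bn2."),
--         ("_fc.", "classifier."),
--     )
--     for old_prefix, new_prefix in top_level_mappings:
--         if key.startswith(old_prefix):
--             return new_prefix + key[len(old_prefix):]
--     return None
-- ===== SOURCE B (Python) =====
-- def _map_top_level_key(key: str) -> str | None: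
--     mapping = {
--         "_conv_stem": "conv_stem",
--         "_bn0": "bn1",
--         "_conv_head": "conv_head",
--         "_bn1": "bn2",
--         "_fc": "classifier",
--     }
--     i = key.find(".")
--     if i == -1:
--         return None
--     new = mapping.get(key[:i])
--     if new is None:
--         return None
--     return new + "." + key[i + 1:]
-- ===== Notes on version B (the rewrite author's own statement) =====
-- stated objective: alternative
-- what changed: Replaces the five-way startswith prefix scan with a single find of the first dot and one keyed dictionary lookup on the segment before it.
import Mathlib
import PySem

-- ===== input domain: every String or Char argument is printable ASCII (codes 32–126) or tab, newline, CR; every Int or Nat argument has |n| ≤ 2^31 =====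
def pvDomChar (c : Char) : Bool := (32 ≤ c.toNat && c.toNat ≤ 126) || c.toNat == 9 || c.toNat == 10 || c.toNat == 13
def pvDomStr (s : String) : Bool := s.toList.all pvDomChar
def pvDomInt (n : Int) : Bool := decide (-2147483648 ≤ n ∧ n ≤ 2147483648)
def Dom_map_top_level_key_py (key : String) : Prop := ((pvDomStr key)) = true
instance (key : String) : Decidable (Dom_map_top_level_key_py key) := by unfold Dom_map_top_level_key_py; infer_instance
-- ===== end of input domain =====

-- B replaces A's five-way startswith prefix scan by one find of the first dot plus a single
-- keyed dictionary lookup on the segment before it (alternative decomposition, same cost).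

-- ===== PORT A =====
-- the loop 'for old_prefix, new_prefix in top_level_mappings: …' of A, as structural recursion
def pvLoopA : List (String × String) → String → Option String
  | [], _ => none
  | (oldp, newp) :: rest, key =>
    if PySem.Str.startswith key oldp then
      some (newp ++ PySem.Str.slice key (some (PySem.Str.len oldp)) none)
    else pvLoopA rest key

def map_top_level_key_py (key : String) : Option String :=
  pvLoopA [("_conv_stem.", "conv_stem."), ("_bn0.", "bn1."), ("_conv_head.", "conv_head."),
           ("_bn1.", "bn2."), ("_fc.", "classifier.")] key

-- ===== PORT B =====
def pvMappingB : PySem.Dict String String :=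
  PySem.Dict.ofList [("_conv_stem", "conv_stem"), ("_bn0", "bn1"), ("_conv_head", "conv_head"),
                     ("_bn1", "bn2"), ("_fc", "classifier")]

def map_top_level_key_py_alt (key : String) : Option String :=
  let i := PySem.Str.find key "."
  if i == -1 then none
  else
    match pvMappingB.get? (PySem.Str.slice key none (some i)) with
    | none => none
    | some newp => some (newp ++ "." ++ PySem.Str.slice key (some (i + 1)) none)

-- ===== PRECONDITION & SPEC =====
def Spec_map_top_level_key_py (key : String) (out : Option String) : Prop := out = map_top_level_key_py_alt key
instance (key : String) (out : Option String) : Decidable (Spec_map_top_level_key_py key out) := by unfold Spec_map_top_level_key_py; infer_instance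

-- ===== CLAIM (what is proved, stated in full; the proofs are below) =====
def Claim_equal_map_top_level_key_py : Prop := ∀ (key : String), Dom_map_top_level_key_py key → Spec_map_top_level_key_py key (map_top_level_key_py key)

-- ===== LEMMAS AND PROOFS =====

theorem pv_exists_split (s : List Char) (h : '.' ∈ s) :
    ∃ p r, s = p ++ '.' :: r ∧ '.' ∉ p := by
  induction s with
  | nil => simp at h
  | cons a t ih =>
    by_cases ha : a = '.'
    · exact ⟨[], t, by simp [ha], by simp⟩
    · have ht : '.' ∈ t := by
        rcases List.mem_cons.mp h with h1 | h1
        · exact absurd h1.symm ha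
        · exact h1
      obtain ⟨p, r, hs, hp⟩ := ih ht
      refine ⟨a :: p, r, by simp [hs], ?_⟩
      simp only [List.mem_cons, not_or]
      exact ⟨fun e => ha e.symm, hp⟩

theorem pv_prefix_dot (p q r : List Char) (hp : '.' ∉ p) (hq : '.' ∉ q) :
    (q ++ ['.']) <+: (p ++ '.' :: r) ↔ q = p := by
  constructor
  · intro h
    induction q generalizing p with
    | nil =>
      cases p with
      | nil => rfl
      | cons b p' =>
        simp only [List.nil_append, List.cons_append, List.cons_prefix_cons] at h
        simp only [List.mem_cons, not_or] at hp
        exact absurd h.1 hp.1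
    | cons a q' ih =>
      cases p with
      | nil =>
        simp only [List.cons_append, List.nil_append, List.cons_prefix_cons] at h
        simp only [List.mem_cons, not_or] at hq
        exact absurd h.1.symm hq.1
      | cons b p' =>
        simp only [List.cons_append, List.cons_prefix_cons] at h
        simp only [List.mem_cons, not_or] at hp hq
        have := ih p' hp.2 hq.2 h.2
        simp [h.1, this]
  · rintro rfl
    exact ⟨r, by simp⟩

theorem pv_find_dot (p r : List Char) (hp : '.' ∉ p) :
    PySem.Chars.find (p ++ '.' :: r) ['.'] = (p.length : Int) := by
  have hinf : ['.'] <:+: p ++ '.' :: r := ⟨p, r, by simp⟩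
  have h0 : 0 ≤ PySem.Chars.find (p ++ '.' :: r) ['.'] :=
    (PySem.Chars.find_nonneg_iff _ _).mpr hinf
  obtain ⟨hpre, hmin⟩ := PySem.Chars.find_spec h0
  set n := (PySem.Chars.find (p ++ '.' :: r) ['.']).toNat with hn
  have hle : n ≤ p.length := by
    by_contra hgt
    exact hmin p.length (by omega) ⟨r, by simp⟩
  have hge : ¬ n < p.length := by
    intro hlt
    obtain ⟨t, ht⟩ := hpre
    have hget : (p ++ '.' :: r)[n]? = some '.' := by
      rw [show n = n + 0 from rfl, ← List.getElem?_drop, ← ht]; simp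
    rw [List.getElem?_append_left (by omega)] at hget
    exact hp (List.mem_of_getElem? hget)
  have : n = p.length := by omega
  omega


theorem pv_toList1 : "_conv_stem.".toList = "_conv_stem".toList ++ ['.'] := by decide
theorem pv_toList2 : "_bn0.".toList = "_bn0".toList ++ ['.'] := by decide
theorem pv_toList3 : "_conv_head.".toList = "_conv_head".toList ++ ['.'] := by decide
theorem pv_toList4 : "_bn1.".toList = "_bn1".toList ++ ['.'] := by decide
theorem pv_toList5 : "_fc.".toList = "_fc".toList ++ ['.'] := by decide

theorem pv_main (key : String) : map_top_level_key_py key = map_top_level_key_py_alt key := by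
  by_cases hd : '.' ∈ key.toList
  case neg =>
    have hfind : PySem.Str.find key "." = -1 := by
      rw [PySem.Str.find_eq, show (".".toList) = ['.'] from rfl]
      exact (PySem.Chars.find_eq_neg_one_iff _ _).mpr (fun hinf => hd (hinf.subset (by simp)))
    have hball : ∀ qs : String, '.' ∈ qs.toList → PySem.Str.startswith key qs = false := by
      intro qs hq
      rw [Bool.eq_false_iff]
      intro hc
      rw [PySem.Str.startswith_eq, PySem.Chars.startswith_iff] at hc
      exact hd (hc.subset hq)
    unfold map_top_level_key_py map_top_level_key_py_alt
    simp only [hfind]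
    simp only [pvLoopA, hball "_conv_stem." (by decide), hball "_bn0." (by decide),
          hball "_conv_head." (by decide), hball "_bn1." (by decide), hball "_fc." (by decide),
          Bool.false_eq_true, if_false]
    rfl
  case pos =>
    obtain ⟨p, r, hs, hp⟩ := pv_exists_split _ hd
    have hfind : PySem.Str.find key "." = (p.length : Int) := by
      rw [PySem.Str.find_eq, show (".".toList) = ['.'] from rfl, hs, pv_find_dot p r hp]
    have htake : (PySem.Str.slice key none (some ((p.length : Int)))).toList = p := by
      rw [PySem.Str.toList_slice, PySem.Chars.slice_eq_listSlice,
          PySem.List.slice_to _ (by positivity), hs]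
      simp [List.take_left']
    have hsw : ∀ q : List Char, '.' ∉ q →
        ∀ qs : String, qs.toList = q ++ ['.'] →
        (PySem.Str.startswith key qs = true ↔ q = p) := by
      intro q hq qs hqs
      rw [PySem.Str.startswith_eq, PySem.Chars.startswith_iff, hqs, hs]
      exact pv_prefix_dot p q r hp hq
    unfold map_top_level_key_py map_top_level_key_py_alt
    simp only [hfind]
    have hne : (((p.length : Int)) == (-1 : Int)) = false := by
      simp only [beq_eq_false_iff_ne, ne_eq]; omega
    rw [if_neg (by simp [hne])]
    by_cases hpe1 : p = "_conv_stem".toList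
    case pos =>
      have hkey : PySem.Str.slice key none (some ((p.length : Int))) = "_conv_stem" :=
        String.toList_inj.mp (htake.trans (by rw [hpe1]))
      have hbt : PySem.Str.startswith key "_conv_stem." = true :=
        (hsw _ (by decide) _ pv_toList1).mpr hpe1.symm
      have hb2 : PySem.Str.startswith key "_bn0." = false := by
        rw [Bool.eq_false_iff]
        intro hc
        have := (hsw _ (by decide) _ pv_toList2).mp hc
        rw [hpe1] at this
        exact absurd this (by decide)
      have hb3 : PySem.Str.startswith key "_conv_head." = false := by
        rw [Bool.eq_false_iff]
        intro hc
        have := (hsw _ (by decide) _ pv_toList3).mp hc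
        rw [hpe1] at this
        exact absurd this (by decide)
      have hb4 : PySem.Str.startswith key "_bn1." = false := by
        rw [Bool.eq_false_iff]
        intro hc
        have := (hsw _ (by decide) _ pv_toList4).mp hc
        rw [hpe1] at this
        exact absurd this (by decide)
      have hb5 : PySem.Str.startswith key "_fc." = false := by
        rw [Bool.eq_false_iff]
        intro hc
        have := (hsw _ (by decide) _ pv_toList5).mp hc
        rw [hpe1] at this
        exact absurd this (by decide)
      simp only [pvLoopA, hbt, hb2, hb3, hb4, hb5, Bool.false_eq_true, if_false, if_true, hkey]
      rw [show pvMappingB.get? "_conv_stem" = some "conv_stem" from rfl]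
      have hlen : ((p.length : Int)) + 1 = PySem.Str.len "_conv_stem." := by rw [hpe1]; decide
      rw [← hlen, show ("conv_stem." : String) = "conv_stem" ++ "." from by decide, String.append_assoc]
      rfl
    case neg =>
    by_cases hpe2 : p = "_bn0".toList
    case pos =>
      have hkey : PySem.Str.slice key none (some ((p.length : Int))) = "_bn0" :=
        String.toList_inj.mp (htake.trans (by rw [hpe2]))
      have hbt : PySem.Str.startswith key "_bn0." = true :=
        (hsw _ (by decide) _ pv_toList2).mpr hpe2.symm
      have hb1 : PySem.Str.startswith key "_conv_stem." = false := by
        rw [Bool.eq_false_iff]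
        intro hc
        have := (hsw _ (by decide) _ pv_toList1).mp hc
        rw [hpe2] at this
        exact absurd this (by decide)
      have hb3 : PySem.Str.startswith key "_conv_head." = false := by
        rw [Bool.eq_false_iff]
        intro hc
        have := (hsw _ (by decide) _ pv_toList3).mp hc
        rw [hpe2] at this
        exact absurd this (by decide)
      have hb4 : PySem.Str.startswith key "_bn1." = false := by
        rw [Bool.eq_false_iff]
        intro hc
        have := (hsw _ (by decide) _ pv_toList4).mp hc
        rw [hpe2] at this
        exact absurd this (by decide)
      have hb5 : PySem.Str.startswith key "_fc." = false := by
        rw [Bool.eq_false_iff]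
        intro hc
        have := (hsw _ (by decide) _ pv_toList5).mp hc
        rw [hpe2] at this
        exact absurd this (by decide)
      simp only [pvLoopA, hbt, hb1, hb3, hb4, hb5, Bool.false_eq_true, if_false, if_true, hkey]
      rw [show pvMappingB.get? "_bn0" = some "bn1" from rfl]
      have hlen : ((p.length : Int)) + 1 = PySem.Str.len "_bn0." := by rw [hpe2]; decide
      rw [← hlen, show ("bn1." : String) = "bn1" ++ "." from by decide, String.append_assoc]
      rfl
    case neg =>
    by_cases hpe3 : p = "_conv_head".toList
    case pos =>
      have hkey : PySem.Str.slice key none (some ((p.length : Int))) = "_conv_head" :=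
        String.toList_inj.mp (htake.trans (by rw [hpe3]))
      have hbt : PySem.Str.startswith key "_conv_head." = true :=
        (hsw _ (by decide) _ pv_toList3).mpr hpe3.symm
      have hb1 : PySem.Str.startswith key "_conv_stem." = false := by
        rw [Bool.eq_false_iff]
        intro hc
        have := (hsw _ (by decide) _ pv_toList1).mp hc
        rw [hpe3] at this
        exact absurd this (by decide)
      have hb2 : PySem.Str.startswith key "_bn0." = false := by
        rw [Bool.eq_false_iff]
        intro hc
        have := (hsw _ (by decide) _ pv_toList2).mp hc
        rw [hpe3] at this
        exact absurd this (by decide)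
      have hb4 : PySem.Str.startswith key "_bn1." = false := by
        rw [Bool.eq_false_iff]
        intro hc
        have := (hsw _ (by decide) _ pv_toList4).mp hc
        rw [hpe3] at this
        exact absurd this (by decide)
      have hb5 : PySem.Str.startswith key "_fc." = false := by
        rw [Bool.eq_false_iff]
        intro hc
        have := (hsw _ (by decide) _ pv_toList5).mp hc
        rw [hpe3] at this
        exact absurd this (by decide)
      simp only [pvLoopA, hbt, hb1, hb2, hb4, hb5, Bool.false_eq_true, if_false, if_true, hkey]
      rw [show pvMappingB.get? "_conv_head" = some "conv_head" from rfl]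
      have hlen : ((p.length : Int)) + 1 = PySem.Str.len "_conv_head." := by rw [hpe3]; decide
      rw [← hlen, show ("conv_head." : String) = "conv_head" ++ "." from by decide, String.append_assoc]
      rfl
    case neg =>
    by_cases hpe4 : p = "_bn1".toList
    case pos =>
      have hkey : PySem.Str.slice key none (some ((p.length : Int))) = "_bn1" :=
        String.toList_inj.mp (htake.trans (by rw [hpe4]))
      have hbt : PySem.Str.startswith key "_bn1." = true :=
        (hsw _ (by decide) _ pv_toList4).mpr hpe4.symm
      have hb1 : PySem.Str.startswith key "_conv_stem." = false := by
        rw [Bool.eq_false_iff]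
        intro hc
        have := (hsw _ (by decide) _ pv_toList1).mp hc
        rw [hpe4] at this
        exact absurd this (by decide)
      have hb2 : PySem.Str.startswith key "_bn0." = false := by
        rw [Bool.eq_false_iff]
        intro hc
        have := (hsw _ (by decide) _ pv_toList2).mp hc
        rw [hpe4] at this
        exact absurd this (by decide)
      have hb3 : PySem.Str.startswith key "_conv_head." = false := by
        rw [Bool.eq_false_iff]
        intro hc
        have := (hsw _ (by decide) _ pv_toList3).mp hc
        rw [hpe4] at this
        exact absurd this (by decide)
      have hb5 : PySem.Str.startswith key "_fc." = false := by
        rw [Bool.eq_false_iff]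
        intro hc
        have := (hsw _ (by decide) _ pv_toList5).mp hc
        rw [hpe4] at this
        exact absurd this (by decide)
      simp only [pvLoopA, hbt, hb1, hb2, hb3, hb5, Bool.false_eq_true, if_false, if_true, hkey]
      rw [show pvMappingB.get? "_bn1" = some "bn2" from rfl]
      have hlen : ((p.length : Int)) + 1 = PySem.Str.len "_bn1." := by rw [hpe4]; decide
      rw [← hlen, show ("bn2." : String) = "bn2" ++ "." from by decide, String.append_assoc]
      rfl
    case neg =>
    by_cases hpe5 : p = "_fc".toList
    case pos =>
      have hkey : PySem.Str.slice key none (some ((p.length : Int))) = "_fc" :=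
        String.toList_inj.mp (htake.trans (by rw [hpe5]))
      have hbt : PySem.Str.startswith key "_fc." = true :=
        (hsw _ (by decide) _ pv_toList5).mpr hpe5.symm
      have hb1 : PySem.Str.startswith key "_conv_stem." = false := by
        rw [Bool.eq_false_iff]
        intro hc
        have := (hsw _ (by decide) _ pv_toList1).mp hc
        rw [hpe5] at this
        exact absurd this (by decide)
      have hb2 : PySem.Str.startswith key "_bn0." = false := by
        rw [Bool.eq_false_iff]
        intro hc
        have := (hsw _ (by decide) _ pv_toList2).mp hc
        rw [hpe5] at this
        exact absurd this (by decide)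
      have hb3 : PySem.Str.startswith key "_conv_head." = false := by
        rw [Bool.eq_false_iff]
        intro hc
        have := (hsw _ (by decide) _ pv_toList3).mp hc
        rw [hpe5] at this
        exact absurd this (by decide)
      have hb4 : PySem.Str.startswith key "_bn1." = false := by
        rw [Bool.eq_false_iff]
        intro hc
        have := (hsw _ (by decide) _ pv_toList4).mp hc
        rw [hpe5] at this
        exact absurd this (by decide)
      simp only [pvLoopA, hbt, hb1, hb2, hb3, hb4, Bool.false_eq_true, if_false, if_true, hkey]
      rw [show pvMappingB.get? "_fc" = some "classifier" from rfl]
      have hlen : ((p.length : Int)) + 1 = PySem.Str.len "_fc." := by rw [hpe5]; decide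
      rw [← hlen, show ("classifier." : String) = "classifier" ++ "." from by decide, String.append_assoc]
      rfl
    case neg =>
      have hb1 : PySem.Str.startswith key "_conv_stem." = false := by
        rw [Bool.eq_false_iff]
        intro hc
        exact hpe1 ((hsw _ (by decide) _ pv_toList1).mp hc).symm
      have hb2 : PySem.Str.startswith key "_bn0." = false := by
        rw [Bool.eq_false_iff]
        intro hc
        exact hpe2 ((hsw _ (by decide) _ pv_toList2).mp hc).symm
      have hb3 : PySem.Str.startswith key "_conv_head." = false := by
        rw [Bool.eq_false_iff]
        intro hc
        exact hpe3 ((hsw _ (by decide) _ pv_toList3).mp hc).symm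
      have hb4 : PySem.Str.startswith key "_bn1." = false := by
        rw [Bool.eq_false_iff]
        intro hc
        exact hpe4 ((hsw _ (by decide) _ pv_toList4).mp hc).symm
      have hb5 : PySem.Str.startswith key "_fc." = false := by
        rw [Bool.eq_false_iff]
        intro hc
        exact hpe5 ((hsw _ (by decide) _ pv_toList5).mp hc).symm
      have hne1 : (("_conv_stem" : String) == PySem.Str.slice key none (some ((p.length : Int)))) = false := by
        simp only [beq_eq_false_iff_ne, ne_eq]
        intro e
        exact hpe1 (((congrArg String.toList e).trans htake).symm)
      have hne2 : (("_bn0" : String) == PySem.Str.slice key none (some ((p.length : Int)))) = false := by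
        simp only [beq_eq_false_iff_ne, ne_eq]
        intro e
        exact hpe2 (((congrArg String.toList e).trans htake).symm)
      have hne3 : (("_conv_head" : String) == PySem.Str.slice key none (some ((p.length : Int)))) = false := by
        simp only [beq_eq_false_iff_ne, ne_eq]
        intro e
        exact hpe3 (((congrArg String.toList e).trans htake).symm)
      have hne4 : (("_bn1" : String) == PySem.Str.slice key none (some ((p.length : Int)))) = false := by
        simp only [beq_eq_false_iff_ne, ne_eq]
        intro e
        exact hpe4 (((congrArg String.toList e).trans htake).symm)
      have hne5 : (("_fc" : String) == PySem.Str.slice key none (some ((p.length : Int)))) = false := by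
        simp only [beq_eq_false_iff_ne, ne_eq]
        intro e
        exact hpe5 (((congrArg String.toList e).trans htake).symm)
      have hget : pvMappingB.get? (PySem.Str.slice key none (some ((p.length : Int)))) = none := by
        rw [show pvMappingB = PySem.Dict.mk [("_conv_stem", "conv_stem"), ("_bn0", "bn1"), ("_conv_head", "conv_head"), ("_bn1", "bn2"), ("_fc", "classifier")] from rfl]
        simp only [PySem.Dict.get?_mk_cons, hne1, hne2, hne3, hne4, hne5, Bool.false_eq_true, if_false]
        rfl
      simp only [pvLoopA, hb1, hb2, hb3, hb4, hb5, Bool.false_eq_true, if_false, hget]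

-- ===== VERDICT (by name: the statement is the Claim_ definition above) =====
theorem map_top_level_key_py_spec : Claim_equal_map_top_level_key_py := by
  intro key _
  exact pv_main key
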